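-- pv_equiv track=rewrite | github.com/salonikalsekar/2021_Learn | INT/test_neha.py | check
-- ===== SOURCE A (Python) =====
-- def check(s):
--     ssplit = s.split(":")
--
--     def checkIdentifier(id):
--         if id[0] == '0' or len(id) > 15:
--             return False
--         for ch in id[1:len(id)]:
--             if not ch.isdigit():
--                 return False
--
--         return True
--
--     def checkIdentifierWeChat(id):
--         if len(id) > 251 or len(id) < 1:
--             return False
--         for ch in id:
--             if not (ch.isalnum() or ch != '+' or ch != '-' or ch != '_' or ch != '@' or ch != '.'):
--                 return False
--
--         return True
--
--     if len(ssplit) == 1: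
--         if checkIdentifier(ssplit[0]):
--             return "SMS";
--         else:
--             return "INVALID_ADDRESS";
--     elif len(ssplit) == 2:
--         if ssplit[0] == "whatsapp":
--             if checkIdentifier(ssplit[1]):
--                 return "WHATSAPP"
--             else:
--                 return "INVALID_ADDRESS"
--         elif ssplit[0] == "messenger":
--             if checkIdentifier(ssplit[1]):
--                 return "MESSENGER"
--             else:
--                 return "INVALID_ADDRESS"
--         elif ssplit[0] == "wechat":
--             if checkIdentifierWeChat(ssplit[1]):
--                 return "WECHAT"
--             else:
--                 return "INVALID_ADDRESS"
--
--     else: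
--         return "INVALID_ADDRESS";
-- ===== SOURCE B (Python) =====
-- # A messaging address is either a bare phone identifier (SMS) or "<service>:<identifier>".
-- # Match the service by its full "name:" prefix on the raw string; an extra ":" anywhere in
-- # the identifier (or in an unmatched string) makes the address malformed.
--
-- def _phone(ident):
--     return ident != "" and ident[0] != "0" and len(ident) <= 15 and all(c.isdigit() for c in ident[1:])
--
--
-- def _wechat(ident):
--     return 1 <= len(ident) <= 251
--
--
-- _ROWS = (
--     ("whatsapp:", "WHATSAPP", _phone),
--     ("messenger:", "MESSENGER", _phone),
--     ("wechat:", "WECHAT", _wechat),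
-- )
--
--
-- def check(s):
--     for prefix, label, ok in _ROWS:
--         if s.startswith(prefix):
--             ident = s[len(prefix):]
--             if ":" not in ident:
--                 return label if ok(ident) else "INVALID_ADDRESS"
--             break
--     if ":" in s:
--         return "INVALID_ADDRESS"
--     return "SMS" if _phone(s) else "INVALID_ADDRESS"
-- ===== Notes on version B (the rewrite author's own statement) =====
-- stated objective: alternative
-- what changed: B never splits the string: it matches the whole address against full 'service:' prefixes with startswith and slicing, rejecting a second ':' inside the identifier, instead of A's split-into-list, branch on part count and if/elif on the first part; Pre_ excludes the two-part inputs with an unknown service prefix, where A falls off the function and returns None instead of a status string, and the empty-identifier inputs on which A raises IndexError.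
-- outside the precondition, e.g. on check('foo:1'): A returns None, B returns 'INVALID_ADDRESS'
import Mathlib
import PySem

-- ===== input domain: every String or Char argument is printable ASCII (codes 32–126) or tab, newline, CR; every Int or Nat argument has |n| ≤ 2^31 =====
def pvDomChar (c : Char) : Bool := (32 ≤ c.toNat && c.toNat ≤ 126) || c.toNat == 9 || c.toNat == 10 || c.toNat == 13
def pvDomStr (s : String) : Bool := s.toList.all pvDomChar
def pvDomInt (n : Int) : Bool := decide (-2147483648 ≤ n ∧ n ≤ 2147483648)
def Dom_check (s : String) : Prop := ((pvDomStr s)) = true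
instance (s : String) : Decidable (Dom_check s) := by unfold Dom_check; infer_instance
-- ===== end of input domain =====

-- B matches the whole address against full "service:" prefixes with startswith/slicing instead of
-- splitting on ':' and branching on the part count; alternative decomposition, no speed claim.

-- ===== PORT A =====
-- def checkIdentifier(id): id[0] raises IndexError on empty id — `none` is unreachable inside
-- Pre_check (those inputs are excluded); the branch value is arbitrary there.
def checkIdentifierA (id : List Char) : Bool :=
  match PySem.List.pyGet? id 0 with
  | none => false
  | some c0 =>
    if c0 = '0' ∨ id.length > 15 then false
    else (PySem.List.slice id (some 1) (some (id.length : Int))).all PySem.Chars.isdigit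

-- def checkIdentifierWeChat(id): the character condition is kept literally (it is always true)
def checkIdentifierWeChatA (id : List Char) : Bool :=
  if id.length > 251 ∨ id.length < 1 then false
  else id.all (fun ch => PySem.Chars.isalnum ch || ch != '+' || ch != '-' || ch != '_' || ch != '@' || ch != '.')

def check (s : String) : Option String :=
  match PySem.Chars.splitOn s.toList [':'] with   -- ssplit = s.split(":")
  | [a] => if checkIdentifierA a then some "SMS" else some "INVALID_ADDRESS"
  | [p, i] =>
    if p = "whatsapp".toList then
      (if checkIdentifierA i then some "WHATSAPP" else some "INVALID_ADDRESS")
    else if p = "messenger".toList then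
      (if checkIdentifierA i then some "MESSENGER" else some "INVALID_ADDRESS")
    else if p = "wechat".toList then
      (if checkIdentifierWeChatA i then some "WECHAT" else some "INVALID_ADDRESS")
    else none                                     -- Python falls off the function: implicit None
  | _ => some "INVALID_ADDRESS"

-- ===== PORT B =====
-- def _phone(ident): ident != "" and ident[0] != '0' and len <= 15 and all digits in ident[1:]
-- (ident[1:] of a nonempty list c :: tl is tl; the empty case is the short-circuited ident != "")
def phoneB : List Char → Bool
  | [] => false
  | c :: tl => c != '0' && decide ((c :: tl).length ≤ 15) && tl.all PySem.Chars.isdigit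

def wechatB (i : List Char) : Bool := decide (1 ≤ i.length ∧ i.length ≤ 251)

-- _ROWS: the (prefix, label, validator) triples
def rowsB : List (List Char × String × (List Char → Bool)) :=
  [("whatsapp:".toList, "WHATSAPP", phoneB),
   ("messenger:".toList, "MESSENGER", phoneB),
   ("wechat:".toList, "WECHAT", wechatB)]

-- the for-loop over _ROWS; `none` = fell through (loop exhausted, or `break` on a 2nd ':')
def loopB (cs : List Char) : List (List Char × String × (List Char → Bool)) → Option String
  | [] => none
  | (p, label, ok) :: rest =>
    if PySem.Chars.startswith cs p then
      (if PySem.Chars.isIn [':'] (cs.drop p.length) then none   -- break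
       else some (if ok (cs.drop p.length) then label else "INVALID_ADDRESS"))
    else loopB cs rest

def check_alt (s : String) : Option String :=
  match loopB s.toList rowsB with
  | some r => some r
  | none =>
    if PySem.Chars.isIn [':'] s.toList then some "INVALID_ADDRESS"
    else some (if phoneB s.toList then "SMS" else "INVALID_ADDRESS")

-- ===== PRECONDITION & SPEC =====
-- Pre_check excludes (i) '', 'whatsapp:' and 'messenger:', on which A raises IndexError, and
-- (ii) two-part inputs whose service prefix is unknown (exactly one ':' and the part before it is
-- none of whatsapp/messenger/wechat), on which A falls off the function and returns None instead
-- of a status string; B returns 'INVALID_ADDRESS' on both kinds.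
def Pre_check (s : String) : Prop :=
  s ≠ "" ∧ s ≠ "whatsapp:" ∧ s ≠ "messenger:" ∧
  (':' ∈ s.toList → ':' ∉ (s.toList.dropWhile (fun c => c != ':')).drop 1 →
    s.toList.takeWhile (fun c => c != ':') ∈
      ["whatsapp".toList, "messenger".toList, "wechat".toList])
instance (s : String) : Decidable (Pre_check s) := by unfold Pre_check; infer_instance
def pvWitness_check : String := "whatsapp:123"
def Spec_check (s : String) (out : Option String) : Prop := out = check_alt s
instance (s : String) (out : Option String) : Decidable (Spec_check s out) := by unfold Spec_check; infer_instance


-- ===== CLAIM (what is proved, stated in full; the proofs are below) =====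
def Claim_equal_check : Prop := ∀ (s : String), Dom_check s → Pre_check s → Spec_check s (check s)

-- ===== LEMMAS AND PROOFS =====

-- reference single-character split: what s.split(":") computes, in structural form
def mySplit : List Char → List (List Char)
  | [] => [[]]
  | c :: cs => if c = ':' then [] :: mySplit cs else (mySplit cs).modifyHead (c :: ·)

theorem mySplit_ne_nil (cs : List Char) : mySplit cs ≠ [] := by
  induction cs with
  | nil => simp [mySplit]
  | cons c cs ih =>
    simp only [mySplit]
    split
    · simp
    · rcases h : mySplit cs with _ | ⟨x, xs⟩
      · exact absurd h ih
      · simp [h]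

theorem splitOn_go_eq (fuel : Nat) (l cur : List Char) (acc : List (List Char))
    (h : l.length ≤ fuel) :
    PySem.Chars.splitOn.go [':'] fuel l cur acc =
      acc.reverse ++ (mySplit l).modifyHead (cur.reverse ++ ·) := by
  induction fuel generalizing l cur acc with
  | zero =>
    have : l = [] := by cases l <;> simp_all
    subst this
    rw [PySem.Chars.splitOn.go.eq_def]
    simp [mySplit]
  | succ fuel ih =>
    cases l with
    | nil =>
      rw [PySem.Chars.splitOn.go.eq_def]
      simp [mySplit]
    | cons c rest =>
      rw [PySem.Chars.splitOn.go.eq_def]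
      simp only [List.isPrefixOf, List.length_cons] at *
      by_cases hc : c = ':'
      · subst hc
        simp only [beq_self_eq_true, Bool.true_and, Bool.and_true, List.isPrefixOf, if_pos,
          List.length_nil, Nat.zero_add, List.drop_succ_cons, List.drop_zero, if_true]
        rw [ih rest [] (cur.reverse :: acc) (by omega)]
        rcases hm : mySplit rest with _ | ⟨x, xs⟩
        · exact absurd hm (mySplit_ne_nil rest)
        · simp [mySplit, hm]
      · have hcc : ((':' == c) && true) = false := by simp [Ne.symm hc]
        rw [hcc]
        simp only [Bool.false_eq_true, if_false]
        rw [ih rest (c :: cur) acc (by omega)]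
        rcases hm : mySplit rest with _ | ⟨x, xs⟩
        · exact absurd hm (mySplit_ne_nil rest)
        · simp [mySplit, hm, hc]

theorem splitOn_eq_mySplit (cs : List Char) :
    PySem.Chars.splitOn cs [':'] = mySplit cs := by
  unfold PySem.Chars.splitOn
  rw [splitOn_go_eq (cs.length + 1) cs [] [] (by omega)]
  rcases hm : mySplit cs with _ | ⟨x, xs⟩
  · exact absurd hm (mySplit_ne_nil cs)
  · simp

theorem mySplit_of_not_mem (cs : List Char) (h : ':' ∉ cs) : mySplit cs = [cs] := by
  induction cs with
  | nil => simp [mySplit]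
  | cons c cs ih =>
    simp only [List.mem_cons, not_or] at h
    simp [mySplit, Ne.symm h.1, ih h.2]

theorem mySplit_append (a r : List Char) (h : ':' ∉ a) :
    mySplit (a ++ ':' :: r) = a :: mySplit r := by
  induction a with
  | nil => simp [mySplit]
  | cons c a ih =>
    simp only [List.mem_cons, not_or] at h
    simp [mySplit, Ne.symm h.1, ih h.2]

theorem isIn_singleton (c : Char) (cs : List Char) :
    PySem.Chars.isIn [c] cs = decide (c ∈ cs) := by
  rcases h : PySem.Chars.isIn [c] cs with _ | _
  · have := PySem.Chars.isIn_eq_false_iff _ _ |>.mp h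
    rw [List.singleton_infix_iff] at this
    simp [this]
  · have := (PySem.Chars.isIn_iff_infix _ _).mp h
    rw [List.singleton_infix_iff] at this
    simp [this]

theorem identA_eq_phoneB (id : List Char) (h : id ≠ []) : checkIdentifierA id = phoneB id := by
  rcases id with _ | ⟨c0, tl⟩
  · exact absurd rfl h
  · unfold checkIdentifierA phoneB
    have h1 : PySem.List.pyGet? (c0 :: tl) 0 = some c0 := by
      simp [PySem.List.pyGet?, PySem.List.pyIdx?]
    rw [h1]
    have h2 : PySem.List.slice (c0 :: tl) (some 1) (some ((c0 :: tl).length : Int)) = tl := by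
      have := PySem.List.slice_natCast (c0 :: tl) 1 (c0 :: tl).length
      simpa using this
    rw [h2]
    by_cases hc : c0 = '0'
    · simp [hc]
    · by_cases h15 : 15 ≤ tl.length
      · have hn : ¬ tl.length < 15 := by omega
        simp [hc, h15, hn]
      · have hy : tl.length < 15 := by omega
        simp [hc, h15, hy]

theorem wechatA_eq_wechatB (id : List Char) : checkIdentifierWeChatA id = wechatB id := by
  unfold checkIdentifierWeChatA wechatB
  have hall : (id.all (fun ch => PySem.Chars.isalnum ch || ch != '+' || ch != '-' || ch != '_' || ch != '@' || ch != '.')) = true := by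
    rw [List.all_eq_true]
    intro ch _
    by_cases h : ch = '+'
    · subst h; simp
    · simp [h]
  split
  · next h =>
    symm
    rw [decide_eq_false_iff_not]
    rintro ⟨h1, h2⟩
    omega
  · next h =>
    rw [hall]
    push_neg at h
    symm
    rw [decide_eq_true_eq]
    omega

theorem startswith_colon_mem (cs p : List Char) (hp : ':' ∈ p)
    (h : PySem.Chars.startswith cs p = true) : ':' ∈ cs := by
  rw [PySem.Chars.startswith_iff] at h
  exact h.mem hp

theorem not_colon_mem_takeWhile (cs : List Char) :
    ':' ∉ cs.takeWhile (fun c => c != ':') := by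
  intro h
  have := List.mem_takeWhile_imp h
  simp at this

theorem decomp_of_mem (cs : List Char) (h : ':' ∈ cs) :
    cs = cs.takeWhile (fun c => c != ':') ++ ':' :: (cs.dropWhile (fun c => c != ':')).drop 1 := by
  induction cs with
  | nil => simp at h
  | cons c cs ih =>
    by_cases hc : c = ':'
    · subst hc; simp
    · have h' : ':' ∈ cs := by
        rcases List.mem_cons.mp h with h | h
        · exact absurd h.symm hc
        · exact h
      have hb : (c != ':') = true := by simp [hc]
      simp only [List.takeWhile_cons, List.dropWhile_cons, hb, if_pos]
      simpa using congrArg (c :: ·) (ih h')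

-- if a row's prefix matches and the string has a second colon, the identifier part keeps one
theorem colon_in_ident (cs p : List Char) (hp : p.count ':' = 1) (h2 : 2 ≤ cs.count ':')
    (h : PySem.Chars.startswith cs p = true) : ':' ∈ cs.drop p.length := by
  rw [PySem.Chars.startswith_iff] at h
  obtain ⟨t, ht⟩ := h
  have hdrop : cs.drop p.length = t := by rw [← ht]; exact List.drop_left
  have hc : cs.count ':' = p.count ':' + t.count ':' := by rw [← ht, List.count_append]
  rw [hdrop, ← List.count_pos_iff]
  omega

theorem startswith_not_mem_false (cs p : List Char) (hp : ':' ∈ p) (hmem : ':' ∉ cs) :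
    PySem.Chars.startswith cs p = false := by
  rcases hh : PySem.Chars.startswith cs p with _ | _
  · rfl
  · exact absurd (startswith_colon_mem cs p hp hh) hmem

-- ===== VERDICT (by name: the statement is the Claim_ definition above) =====
theorem check_spec : Claim_equal_check := by
  intro s _ hpre
  obtain ⟨h0, hw, hm, hpref⟩ := hpre
  have hnil : s.toList ≠ [] := fun hn => h0 (String.toList_inj.mp (by rw [hn]; rfl))
  unfold Spec_check check check_alt
  rw [splitOn_eq_mySplit]
  by_cases hmem : ':' ∈ s.toList
  · have hcs := decomp_of_mem s.toList hmem
    set a := s.toList.takeWhile (fun c => c != ':') with ha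
    set r := (s.toList.dropWhile (fun c => c != ':')).drop 1 with hr
    have hna : ':' ∉ a := not_colon_mem_takeWhile s.toList
    by_cases hrr : ':' ∈ r
    · -- at least three parts on both sides
      have hcnt : 2 ≤ s.toList.count ':' := by
        have e1 : a.count ':' = 0 := List.count_eq_zero.mpr hna
        have e2 : 0 < r.count ':' := List.count_pos_iff.mpr hrr
        rw [hcs, List.count_append, List.count_cons_self]
        omega
      have hloop : loopB s.toList rowsB = none := by
        simp only [rowsB, loopB]
        split_ifs with h1 h2 h3 h4 h5 h6 <;> try rfl
        · exact absurd (by rw [isIn_singleton]; simpa using colon_in_ident s.toList _ (by decide) hcnt h1) h2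
        · exact absurd (by rw [isIn_singleton]; simpa using colon_in_ident s.toList _ (by decide) hcnt h3) h4
        · exact absurd (by rw [isIn_singleton]; simpa using colon_in_ident s.toList _ (by decide) hcnt h5) h6
      rw [hloop]
      have hcr := decomp_of_mem r hrr
      rw [hcs, mySplit_append a r hna, hcr,
        mySplit_append _ _ (not_colon_mem_takeWhile r)]
      rcases hms : mySplit ((r.dropWhile (fun c => c != ':')).drop 1) with _ | ⟨x, xs⟩
      · exact absurd hms (mySplit_ne_nil _)
      · simp [isIn_singleton, ← hcs, hmem]
    · -- exactly one ':': Pre_check pins the prefix to one of the three services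
      have hrne : ∀ w : String, s ≠ w → s.toList = w.toList ++ r → r ≠ [] := by
        intro w hsw hsl hre
        exact hsw (String.toList_inj.mp (by rw [hsl, hre, List.append_nil]))
      have hmem3 := hpref hmem hrr
      simp only [List.mem_cons, List.not_mem_nil, or_false] at hmem3
      rcases hmem3 with heq | heq | heq
      · -- whatsapp
        have hsl : s.toList = "whatsapp:".toList ++ r := by rw [hcs, heq]; rfl
        have hmr : mySplit s.toList = "whatsapp".toList :: mySplit r := by
          rw [hcs, heq]; exact mySplit_append "whatsapp".toList r (by decide)
        rw [hmr, mySplit_of_not_mem r hrr, hsl]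
        simp [rowsB, loopB, PySem.Chars.startswith, List.isPrefixOf, isIn_singleton, hrr,
          identA_eq_phoneB r (hrne "whatsapp:" hw hsl)]
        split_ifs <;> rfl
      · -- messenger
        have hsl : s.toList = "messenger:".toList ++ r := by rw [hcs, heq]; rfl
        have hmr : mySplit s.toList = "messenger".toList :: mySplit r := by
          rw [hcs, heq]; exact mySplit_append "messenger".toList r (by decide)
        rw [hmr, mySplit_of_not_mem r hrr, hsl]
        simp [rowsB, loopB, PySem.Chars.startswith, List.isPrefixOf, isIn_singleton, hrr,
          identA_eq_phoneB r (hrne "messenger:" hm hsl)]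
        split_ifs <;> rfl
      · -- wechat
        have hsl : s.toList = "wechat:".toList ++ r := by rw [hcs, heq]; rfl
        have hmr : mySplit s.toList = "wechat".toList :: mySplit r := by
          rw [hcs, heq]; exact mySplit_append "wechat".toList r (by decide)
        rw [hmr, mySplit_of_not_mem r hrr, hsl]
        simp [rowsB, loopB, PySem.Chars.startswith, List.isPrefixOf, isIn_singleton, hrr,
          wechatA_eq_wechatB r]
        split_ifs <;> rfl
  · -- no ':' at all: single part, SMS on both sides
    have f1 := startswith_not_mem_false s.toList ("whatsapp:".toList) (by decide) hmem
    have f2 := startswith_not_mem_false s.toList ("messenger:".toList) (by decide) hmem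
    have f3 := startswith_not_mem_false s.toList ("wechat:".toList) (by decide) hmem
    rw [mySplit_of_not_mem _ hmem]
    simp only [rowsB, loopB, f1, f2, f3, Bool.false_eq_true, if_false, isIn_singleton,
      hmem, decide_false]
    rw [identA_eq_phoneB s.toList hnil]
    by_cases hph : phoneB s.toList = true <;> simp [hph]
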